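-- pv_equiv track=rewrite | github.com/turkeyphage/parsePDF | parsePDF.py | remove_duplicated_item
-- ===== SOURCE A (Python) =====
-- def remove_duplicated_item(original_dic):
--     noDuplicatedDic = {}
--     for key,value in original_dic.items():
--         if key.lower() not in noDuplicatedDic.keys():
--            noDuplicatedDic[key.lower()]=value
--         elif key.lower() in noDuplicatedDic.keys():
--            newValue = noDuplicatedDic[key.lower()] + value
--            noDuplicatedDic[key.lower()] = newValue
--
--     return noDuplicatedDic
-- ===== SOURCE B (Python) =====
-- from functools import reduce
-- import operator
--
--
-- def remove_duplicated_item(original_dic):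
--     # One pass groups values per lowercased key; a second pass folds each bucket.
--     buckets = {}
--     for key, value in original_dic.items():
--         buckets.setdefault(key.lower(), []).append(value)
--     return {k: reduce(operator.add, b) for k, b in buckets.items()}
-- ===== Notes on version B (the rewrite author's own statement) =====
-- stated objective: alternative
-- what changed: A merges in a single fold that looks up and overwrites the running result per item; B first groups all values into per-lowercased-key buckets (setdefault/append) and then reduces each bucket with functools.reduce(operator.add) in a separate pass.
import Mathlib
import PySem

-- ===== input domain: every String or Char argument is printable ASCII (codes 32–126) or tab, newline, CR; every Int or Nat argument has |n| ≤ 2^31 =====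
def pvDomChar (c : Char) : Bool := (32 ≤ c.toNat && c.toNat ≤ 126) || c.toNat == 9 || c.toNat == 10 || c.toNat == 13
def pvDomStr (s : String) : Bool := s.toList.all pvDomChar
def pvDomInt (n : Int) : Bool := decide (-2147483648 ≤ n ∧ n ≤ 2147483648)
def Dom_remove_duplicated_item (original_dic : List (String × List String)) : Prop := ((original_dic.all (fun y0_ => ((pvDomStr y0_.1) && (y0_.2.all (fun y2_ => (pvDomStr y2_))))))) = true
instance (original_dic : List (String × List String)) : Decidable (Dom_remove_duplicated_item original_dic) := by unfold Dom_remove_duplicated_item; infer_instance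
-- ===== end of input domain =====

-- B re-decomposes A's single merge-as-you-go fold into group-into-buckets then reduce-each-bucket;
-- objective: alternative decomposition (same cost, no speed claim).

-- ===== PORT A =====
-- A: one fold over the items; per item, look the lowercased key up in the running
-- result and either insert the value or insert the concatenation.
def remove_duplicated_item (original_dic : List (String × List String)) : List (String × List String) :=
  (original_dic.foldl
    (fun noDuplicatedDic kv =>
      let k := PySem.Str.lower kv.1
      if noDuplicatedDic.contains k = false then
        noDuplicatedDic.insert k kv.2
      else
        let newValue := noDuplicatedDic.getD k [] ++ kv.2
        noDuplicatedDic.insert k newValue)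
    PySem.Dict.empty).items

-- ===== PORT B =====
-- reduce(operator.add, bucket): left fold of ++ seeded with the first element.
def rdiReduceAdd (bucket : List (List String)) : List String :=
  match bucket with
  | [] => []          -- unreachable: buckets are never empty
  | h :: t => t.foldl (· ++ ·) h

def remove_duplicated_item_alt (original_dic : List (String × List String)) : List (String × List String) :=
  let buckets := original_dic.foldl
    (fun buckets kv => buckets.modify (PySem.Str.lower kv.1) [] (· ++ [kv.2]))
    PySem.Dict.empty
  buckets.items.map (fun kb => (kb.1, rdiReduceAdd kb.2))

-- ===== PRECONDITION & SPEC =====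
def Spec_remove_duplicated_item (original_dic : List (String × List String)) (out : List (String × List String)) : Prop := out = remove_duplicated_item_alt original_dic
instance (original_dic : List (String × List String)) (out : List (String × List String)) : Decidable (Spec_remove_duplicated_item original_dic out) := by unfold Spec_remove_duplicated_item; infer_instance

-- ===== CLAIM (what is proved, stated in full; the proofs are below) =====
def Claim_equal_remove_duplicated_item : Prop := ∀ (original_dic : List (String × List String)), Dom_remove_duplicated_item original_dic → Spec_remove_duplicated_item original_dic (remove_duplicated_item original_dic)

-- ===== LEMMAS AND PROOFS =====

-- the A-side loop body and the B-side loop body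
def rdiStepA (d : PySem.Dict String (List String)) (kv : String × List String) :
    PySem.Dict String (List String) :=
  let k := PySem.Str.lower kv.1
  if d.contains k = false then d.insert k kv.2
  else d.insert k (d.getD k [] ++ kv.2)

def rdiStepB (g : PySem.Dict String (List (List String))) (kv : String × List String) :
    PySem.Dict String (List (List String)) :=
  g.modify (PySem.Str.lower kv.1) [] (· ++ [kv.2])

-- B's grouping dict, mapped bucket-wise through the reduce, as a dict
def rdiMapReduce (g : PySem.Dict String (List (List String))) : PySem.Dict String (List String) :=
  PySem.Dict.mk (g.items.map (fun kb => (kb.1, rdiReduceAdd kb.2)))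

lemma rdiReduceAdd_append (b : List (List String)) (v : List String) :
    rdiReduceAdd (b ++ [v]) = rdiReduceAdd b ++ v := by
  cases b with
  | nil => simp [rdiReduceAdd]
  | cons h t => simp [rdiReduceAdd]

lemma rdiGet?_mapReduce (g : PySem.Dict String (List (List String))) (k : String) :
    (rdiMapReduce g).get? k = (g.get? k).map rdiReduceAdd := by
  simp only [rdiMapReduce, PySem.Dict.get?, List.find?_map, Option.map_map]
  rfl

lemma rdiContains_mapReduce (g : PySem.Dict String (List (List String))) (k : String) :
    (rdiMapReduce g).contains k = g.contains k := by
  rw [PySem.Dict.contains_eq_isSome_get?, PySem.Dict.contains_eq_isSome_get?, rdiGet?_mapReduce]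
  cases g.get? k <;> rfl

lemma rdiGetD_mapReduce (g : PySem.Dict String (List (List String))) (k : String) :
    (rdiMapReduce g).getD k [] = rdiReduceAdd (g.getD k []) := by
  rw [PySem.Dict.getD_eq_get?_getD, PySem.Dict.getD_eq_get?_getD, rdiGet?_mapReduce]
  cases g.get? k with
  | none => rfl
  | some b => rfl

lemma rdiStep_comm (g : PySem.Dict String (List (List String))) (kv : String × List String) :
    rdiStepA (rdiMapReduce g) kv = rdiMapReduce (rdiStepB g kv) := by
  set k := PySem.Str.lower kv.1 with hk
  have hmod : rdiStepB g kv = g.insert k ((g.getD k []) ++ [kv.2]) := rfl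
  have hitems : ∀ d : PySem.Dict String (List (List String)),
      (rdiMapReduce d).items = d.items.map (fun kb => (kb.1, rdiReduceAdd kb.2)) := fun _ => rfl
  by_cases hc : g.contains k
  · -- key already present: both sides overwrite in place
    have hcA : (rdiMapReduce g).contains k = true := by rw [rdiContains_mapReduce]; exact hc
    have hA : rdiStepA (rdiMapReduce g) kv
        = (rdiMapReduce g).insert k ((rdiMapReduce g).getD k [] ++ kv.2) := by
      simp [rdiStepA, ← hk, hcA]
    apply PySem.Dict.ext
    rw [hA, hmod, hitems, PySem.Dict.items_insert_of_contains _ _ hcA,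
      PySem.Dict.items_insert_of_contains _ _ hc, hitems, List.map_map, List.map_map]
    apply List.map_congr_left
    intro p _
    by_cases hpk : p.1 == k
    · simp [Function.comp, hpk, rdiGetD_mapReduce, rdiReduceAdd_append]
    · simp [Function.comp, hpk]
  · -- fresh key: both sides append at the end
    have hc' : g.contains k = false := by simpa using hc
    have hcA : (rdiMapReduce g).contains k = false := by rw [rdiContains_mapReduce]; exact hc'
    have hgD : g.getD k [] = [] := PySem.Dict.getD_of_not_contains _ _ hc'
    have hA : rdiStepA (rdiMapReduce g) kv = (rdiMapReduce g).insert k kv.2 := by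
      simp [rdiStepA, ← hk, hcA]
    apply PySem.Dict.ext
    rw [hA, hmod, hgD, hitems, PySem.Dict.items_insert_of_not_contains _ _ hcA,
      PySem.Dict.items_insert_of_not_contains _ _ hc', hitems]
    simp [rdiReduceAdd]

lemma rdiFold_comm (l : List (String × List String)) (g : PySem.Dict String (List (List String))) :
    l.foldl rdiStepA (rdiMapReduce g) = rdiMapReduce (l.foldl rdiStepB g) := by
  induction l generalizing g with
  | nil => rfl
  | cons kv t ih => rw [List.foldl_cons, List.foldl_cons, rdiStep_comm, ih]

-- ===== VERDICT (by name: the statement is the Claim_ definition above) =====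
theorem remove_duplicated_item_spec : Claim_equal_remove_duplicated_item := by
  intro original_dic _
  show remove_duplicated_item original_dic = remove_duplicated_item_alt original_dic
  have hA : remove_duplicated_item original_dic
      = (original_dic.foldl rdiStepA (rdiMapReduce PySem.Dict.empty)).items := rfl
  rw [hA, rdiFold_comm]
  rfl
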